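-- pv_equiv track=rewrite | github.com/skogsbaer/check-assignments | src/utils.py | stripSlashes
-- ===== SOURCE A (Python) =====
-- def stripSlashes(x):
--     if not x:
--         return x
--     x = x.strip()
--     if x.endswith('/'):
--         return stripSlashes(x[:-1])
--     else:
--         return x
-- ===== SOURCE B (Python) =====
-- def stripSlashes(x):
--     if not x:
--         return x
--     return x.lstrip().rstrip(" \t\n\r\x0b\x0c/")
-- ===== Notes on version B (the rewrite author's own statement) =====
-- stated objective: simpler
-- what changed: Replaces the strip-then-recurse loop by a single closed form: one lstrip plus one rstrip over whitespace-and-slash, with no recursion or iteration.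
import Mathlib
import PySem

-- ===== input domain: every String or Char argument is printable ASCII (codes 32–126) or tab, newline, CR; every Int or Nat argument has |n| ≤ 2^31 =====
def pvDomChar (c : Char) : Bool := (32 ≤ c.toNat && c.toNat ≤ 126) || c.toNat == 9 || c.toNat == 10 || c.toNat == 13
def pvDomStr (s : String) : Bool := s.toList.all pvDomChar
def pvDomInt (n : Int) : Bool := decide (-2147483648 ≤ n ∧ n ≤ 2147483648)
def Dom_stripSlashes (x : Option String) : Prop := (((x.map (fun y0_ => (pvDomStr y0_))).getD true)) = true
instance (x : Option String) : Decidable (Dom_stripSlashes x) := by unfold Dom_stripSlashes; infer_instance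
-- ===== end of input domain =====

-- B is the closed form: one lstrip plus one rstrip over whitespace-and-'/' replaces A's
-- strip-then-recurse loop (equal on the ASCII domain; return value only, no mutation involved).

-- ===== PORT A =====
-- recursive core of A on the character list: x.strip(); drop one trailing '/'; recurse
def stripSlashesA (cs : List Char) : List Char :=
  if cs = [] then cs
  else
    let t := PySem.Chars.strip cs
    if PySem.Chars.endswith t ['/'] then
      stripSlashesA (PySem.List.slice t none (some (-1)))   -- stripSlashes(x[:-1])
    else t
termination_by cs.length
decreasing_by
  rename_i _hne hsl
  have h1 : PySem.Chars.strip cs ≠ [] := by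
    intro h; simp only [t, h, PySem.Chars.endswith] at hsl; simp at hsl
  have h2 : (PySem.Chars.strip cs).length ≤ cs.length := by
    have : (PySem.Chars.strip cs).Sublist cs := by
      simp only [PySem.Chars.strip, PySem.Chars.rstrip, PySem.Chars.lstrip]
      have s1 : ((PySem.Chars.lstrip cs).reverse.dropWhile PySem.Chars.isspace).reverse.Sublist
            (PySem.Chars.lstrip cs) := by
        simpa using (List.dropWhile_sublist (l := (PySem.Chars.lstrip cs).reverse)
                (p := PySem.Chars.isspace)).reverse
      exact s1.trans (List.dropWhile_sublist _)
    exact this.length_le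
  rw [PySem.List.slice_to_neg_one]
  have : 0 < (PySem.Chars.strip cs).length := List.length_pos_iff.mpr h1
  simp only [List.length_dropLast]
  omega

def stripSlashes (x : Option String) : Option String :=
  match x with
  | none => none                                   -- `if not x: return x`
  | some s => if s = "" then some s else some (String.ofList (stripSlashesA s.toList))

-- ===== PORT B =====
-- Source B's rstrip(" \t\n\r\x0b\x0c/"): drop trailing chars of that set
def pvStripSet : List Char := [' ', '\t', '\n', '\x0d', '\x0b', '\x0c', '/']

def rstripWsSlash (cs : List Char) : List Char :=
  (cs.reverse.dropWhile (fun c => pvStripSet.contains c)).reverse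

def stripSlashes_alt (x : Option String) : Option String :=
  match x with
  | none => none
  | some s => if s = "" then some s
              else some (String.ofList (rstripWsSlash (PySem.Chars.lstrip s.toList)))

-- ===== PRECONDITION & SPEC =====
def Spec_stripSlashes (x : Option String) (out : Option String) : Prop := out = stripSlashes_alt x
instance (x : Option String) (out : Option String) : Decidable (Spec_stripSlashes x out) := by unfold Spec_stripSlashes; infer_instance

-- ===== CLAIM (what is proved, stated in full; the proofs are below) =====
def Claim_equal_stripSlashes : Prop := ∀ (x : Option String), Dom_stripSlashes x → Spec_stripSlashes x (stripSlashes x)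

-- ===== LEMMAS AND PROOFS =====

theorem char_eq_of_toNat_eq {a b : Char} (h : a.toNat = b.toNat) : a = b := by
  apply Char.ext; unfold Char.toNat at h; exact UInt32.toNat_inj.mp h

theorem q_eq (c : Char) (h : pvDomChar c = true) :
    pvStripSet.contains c = (PySem.Chars.isspace c || c == '/') := by
  have hc : ∀ b : Char, (c == b) = decide (c.toNat = b.toNat) := by
    intro b
    by_cases hb : c = b
    · subst hb; simp
    · rw [beq_eq_false_iff_ne.mpr hb]; symm
      exact decide_eq_false (fun hn => hb (char_eq_of_toNat_eq hn))
  simp only [pvDomChar, Bool.or_eq_true, Bool.and_eq_true, decide_eq_true_eq, beq_iff_eq] at h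
  rw [Bool.eq_iff_iff]
  simp only [pvStripSet, List.contains_cons, List.contains_nil, PySem.Chars.isspace, hc,
    Bool.or_eq_true, Bool.and_eq_true, decide_eq_true_eq, Bool.or_false,
    show (' ' : Char).toNat = 32 from rfl, show ('\t' : Char).toNat = 9 from rfl,
    show ('\n' : Char).toNat = 10 from rfl, show ('\x0d' : Char).toNat = 13 from rfl,
    show ('\x0b' : Char).toNat = 11 from rfl, show ('\x0c' : Char).toNat = 12 from rfl,
    show ('/' : Char).toNat = 47 from rfl]
  omega

theorem rstrip_prefix (l : List Char) : PySem.Chars.rstrip l <+: l := by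
  have h := List.dropWhile_suffix (l := l.reverse) (p := PySem.Chars.isspace)
  simpa [PySem.Chars.rstrip] using h.reverse

theorem dropWhile_absorb (ws q : Char → Bool) (m : List Char)
    (h : ∀ c ∈ m, ws c = true → q c = true) :
    List.dropWhile q (List.dropWhile ws m) = List.dropWhile q m := by
  induction m with
  | nil => rfl
  | cons a t ih =>
    by_cases ha : ws a = true
    · rw [List.dropWhile_cons_of_pos ha, List.dropWhile_cons_of_pos (h a (by simp) ha)]
      exact ih (fun c hc => h c (by simp [hc]))
    · rw [List.dropWhile_cons_of_neg ha]

theorem rstripWsSlash_rstrip (l : List Char) (h : ∀ c ∈ l, pvDomChar c = true) :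
    rstripWsSlash (PySem.Chars.rstrip l) = rstripWsSlash l := by
  simp only [rstripWsSlash, PySem.Chars.rstrip, List.reverse_reverse]
  rw [dropWhile_absorb]
  intro c hc hws
  rw [q_eq c (h c (List.mem_reverse.mp hc)), hws, Bool.true_or]

theorem rstripWsSlash_append_slash (u : List Char) :
    rstripWsSlash (u ++ ['/']) = rstripWsSlash u := by
  simp only [rstripWsSlash, List.reverse_append]
  rw [show (['/'] : List Char).reverse ++ u.reverse = '/' :: u.reverse by simp,
     List.dropWhile_cons_of_pos (by decide)]

theorem rstripWsSlash_eq_self (t : List Char)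
    (h : ∀ b, t.getLast? = some b → pvStripSet.contains b = false) :
    rstripWsSlash t = t := by
  cases ht : t.reverse with
  | nil =>
    have : t = [] := by simpa using congrArg List.reverse ht
    subst this; rfl
  | cons b r =>
    have hb : t.getLast? = some b := by
      rw [← List.head?_reverse, ht]; rfl
    unfold rstripWsSlash
    rw [ht, List.dropWhile_cons_of_neg (by simpa using h b hb), ← ht, List.reverse_reverse]

theorem main_core (cs : List Char) (h : ∀ c ∈ cs, pvDomChar c = true) :
    stripSlashesA cs = rstripWsSlash (PySem.Chars.lstrip cs) := by
  induction cs using stripSlashesA.induct with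
  | case1 => simp [stripSlashesA, rstripWsSlash, PySem.Chars.lstrip]
  | case2 x hne t hsl ih =>
    -- names: t := strip x inside
    have hl_sub : ∀ c ∈ PySem.Chars.lstrip x, c ∈ x :=
      fun c hc => (List.dropWhile_suffix _).subset hc
    have ht_sub : ∀ c ∈ PySem.Chars.strip x, c ∈ x := by
      intro c hc
      exact hl_sub c ((rstrip_prefix (PySem.Chars.lstrip x)).subset hc)
    obtain ⟨u, hu⟩ : ∃ u, PySem.Chars.strip x = u ++ ['/'] := by
      have : ['/'] <:+ PySem.Chars.strip x := by
        simpa [PySem.Chars.endswith, List.isSuffixOf_iff_suffix] using hsl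
      obtain ⟨u, hu⟩ := this
      exact ⟨u, hu.symm⟩
    have hslice : PySem.List.slice (PySem.Chars.strip x) none (some (-1)) = u := by
      rw [PySem.List.slice_to_neg_one, hu]; simp
    have hdomu : ∀ c ∈ PySem.List.slice (PySem.Chars.strip x) none (some (-1)), pvDomChar c = true := by
      intro c hc
      rw [hslice] at hc
      exact h c (ht_sub c (by rw [hu]; exact List.mem_append_left _ hc))
    have hlu : PySem.Chars.lstrip u = u := by
      cases u with
      | nil => rfl
      | cons a v =>
        -- head of strip x is a, and it fails isspace since lstrip x starts with it
        obtain ⟨r, hr⟩ := rstrip_prefix (PySem.Chars.lstrip x)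
        rw [show PySem.Chars.rstrip (PySem.Chars.lstrip x) = PySem.Chars.strip x from rfl, hu] at hr
        have hhead : (PySem.Chars.lstrip x).head? = some a := by
          rw [← hr]; rfl
        have hws : PySem.Chars.isspace a = false := by
          have := List.head?_dropWhile_not PySem.Chars.isspace x
          rw [show List.dropWhile PySem.Chars.isspace x = PySem.Chars.lstrip x from rfl, hhead] at this
          exact this
        simp only [PySem.Chars.lstrip]
        rw [List.dropWhile_cons_of_neg (by simp [hws])]
    -- unfold A one step
    have hsl' : PySem.Chars.endswith (PySem.Chars.strip x) ['/'] = true := hsl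
    rw [stripSlashesA, if_neg hne, if_pos hsl']
    rw [ih hdomu, hslice, hlu]
    -- RHS side
    rw [← rstripWsSlash_rstrip (PySem.Chars.lstrip x) (fun c hc => h c (hl_sub c hc))]
    rw [show PySem.Chars.rstrip (PySem.Chars.lstrip x) = PySem.Chars.strip x from rfl, hu,
        rstripWsSlash_append_slash]
  | case3 x hne t hsl =>
    have hsl' : ¬ PySem.Chars.endswith (PySem.Chars.strip x) ['/'] = true := hsl
    rw [stripSlashesA, if_neg hne, if_neg hsl']
    have hl_sub : ∀ c ∈ PySem.Chars.lstrip x, c ∈ x :=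
      fun c hc => (List.dropWhile_suffix _).subset hc
    rw [← rstripWsSlash_rstrip (PySem.Chars.lstrip x) (fun c hc => h c (hl_sub c hc))]
    rw [show PySem.Chars.rstrip (PySem.Chars.lstrip x) = PySem.Chars.strip x from rfl]
    symm
    apply rstripWsSlash_eq_self
    intro b hb
    have hbmem : b ∈ PySem.Chars.strip x := List.mem_of_getLast? hb
    have hbx : b ∈ x := by
      exact hl_sub b ((rstrip_prefix (PySem.Chars.lstrip x)).subset hbmem)
    rw [q_eq b (h b hbx)]
    have hslash : (b == '/') = false := by
      by_contra hc
      have hb' : b = '/' := by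
        cases hbe : (b == '/') with
        | false => exact absurd hbe hc
        | true => exact beq_iff_eq.mp hbe
      apply hsl
      subst hb'
      have : ['/'] <:+ PySem.Chars.strip x := by
        obtain ⟨w, hw⟩ := List.getLast?_eq_some_iff.mp hb
        exact ⟨w, hw.symm⟩
      simpa [PySem.Chars.endswith, List.isSuffixOf_iff_suffix] using this
    have hws : PySem.Chars.isspace b = false := by
      have htr : (PySem.Chars.strip x).reverse =
          List.dropWhile PySem.Chars.isspace (PySem.Chars.lstrip x).reverse := by
        simp [PySem.Chars.strip, PySem.Chars.rstrip]
      have := List.head?_dropWhile_not PySem.Chars.isspace (PySem.Chars.lstrip x).reverse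
      rw [← htr, List.head?_reverse, hb] at this
      exact this
    rw [hws, hslash]
    rfl

-- ===== VERDICT (by name: the statement is the Claim_ definition above) =====
theorem stripSlashes_spec : Claim_equal_stripSlashes := by
  intro x hdom
  unfold Spec_stripSlashes
  match x with
  | none => rfl
  | some s =>
    simp only [stripSlashes, stripSlashes_alt]
    split_ifs with hs
    · rfl
    · have h : ∀ c ∈ s.toList, pvDomChar c = true := by
        simpa [Dom_stripSlashes, pvDomStr, List.all_eq_true] using hdom
      rw [main_core s.toList h]
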